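-- pv_equiv track=rewrite | github.com/ilveron/FondProg1 | Scripts/Esercizio (67).py | Farfallizza
-- ===== SOURCE A (Python) =====
-- def Farfallizza(Frase):
--     Risultato = ''
--     for Car in Frase:
--         if Car in 'aeiou':
--             Risultato += Car+'f'+Car
--         else:
--             Risultato+=Car
--     return Risultato
-- ===== SOURCE B (Python) =====
-- def Farfallizza(Frase):
--     Risultato = Frase
--     for v in 'aeiou':
--         Risultato = Risultato.replace(v, v + 'f' + v)
--     return Risultato
-- ===== Notes on version B (the rewrite author's own statement) =====
-- stated objective: idiomatic
-- what changed: Replaces the char-by-char accumulator loop with five whole-string str.replace passes, one per vowel (correct because a pass only inserts 'f', never a vowel).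
import Mathlib
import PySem

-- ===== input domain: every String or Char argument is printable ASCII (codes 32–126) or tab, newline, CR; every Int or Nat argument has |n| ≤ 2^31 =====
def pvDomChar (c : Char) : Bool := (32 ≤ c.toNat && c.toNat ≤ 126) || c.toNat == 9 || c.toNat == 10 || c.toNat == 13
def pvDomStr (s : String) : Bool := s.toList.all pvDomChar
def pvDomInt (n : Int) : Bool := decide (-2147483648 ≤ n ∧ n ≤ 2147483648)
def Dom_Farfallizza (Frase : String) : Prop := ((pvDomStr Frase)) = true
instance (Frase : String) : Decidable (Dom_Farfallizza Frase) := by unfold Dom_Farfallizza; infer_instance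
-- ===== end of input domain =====

-- B replaces A's char-by-char accumulator loop with one str.replace pass per vowel (idiomatic, not claimed faster).

-- ===== PORT A =====
-- A: accumulate character by character, tripling each vowel as v+'f'+v.
def Farfallizza (Frase : String) : String :=
  Frase.toList.foldl
    (fun Risultato Car =>
      if PySem.Str.isIn (String.ofList [Car]) "aeiou" then
        Risultato ++ (String.ofList [Car] ++ "f" ++ String.ofList [Car])
      else
        Risultato ++ String.ofList [Car])
    ""

-- ===== PORT B =====
-- B: start from Frase; for each vowel v, Risultato = Risultato.replace(v, v+'f'+v).
def Farfallizza_alt (Frase : String) : String :=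
  "aeiou".toList.foldl
    (fun Risultato v =>
      PySem.Str.replace Risultato (String.ofList [v]) (String.ofList [v] ++ "f" ++ String.ofList [v]))
    Frase

-- ===== PRECONDITION & SPEC =====
def Spec_Farfallizza (Frase : String) (out : String) : Prop := out = Farfallizza_alt Frase
instance (Frase : String) (out : String) : Decidable (Spec_Farfallizza Frase out) := by unfold Spec_Farfallizza; infer_instance

-- ===== CLAIM (what is proved, stated in full; the proofs are below) =====
def Claim_equal_Farfallizza : Prop := ∀ (Frase : String), Dom_Farfallizza Frase → Spec_Farfallizza Frase (Farfallizza Frase)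

-- ===== LEMMAS AND PROOFS =====

-- the per-character expansion both programs compute
def pvExpand (c : Char) : List Char :=
  if c = 'a' ∨ c = 'e' ∨ c = 'i' ∨ c = 'o' ∨ c = 'u' then [c, 'f', c] else [c]

-- single-char replacement as a flatMap
def pvRep (v : Char) (c : Char) : List Char :=
  if c = v then [v, 'f', v] else [c]

lemma pv_go_single (v : Char) (new : List Char) :
    ∀ (fuel : Nat) (l acc : List Char), l.length ≤ fuel →
      PySem.Chars.replace.go [v] new fuel l acc
        = acc.reverse ++ l.flatMap (fun c => if c = v then new else [c]) := by
  intro fuel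
  induction fuel with
  | zero =>
    intro l acc h
    have : l = [] := List.length_eq_zero_iff.mp (Nat.le_zero.mp h)
    subst this
    simp [PySem.Chars.replace.go]
  | succ n ih =>
    intro l acc h
    cases l with
    | nil => simp [PySem.Chars.replace.go]
    | cons c t =>
      by_cases hc : c = v
      · subst hc
        have hp : [c].isPrefixOf (c :: t) = true := by
          simp [List.isPrefixOf]
        rw [PySem.Chars.replace.go]
        simp only [hp, if_true, List.length_cons, List.length_nil, List.drop_succ_cons, List.drop_zero]
        rw [ih t _ (by simpa using Nat.le_of_succ_le_succ h)]
        simp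
      · have hp : [v].isPrefixOf (c :: t) = false := by
          simp [List.isPrefixOf, Ne.symm hc]
        rw [PySem.Chars.replace.go]
        simp only [hp, Bool.false_eq_true, if_false]
        rw [ih t _ (by simpa using Nat.le_of_succ_le_succ h)]
        simp [hc]

lemma pv_replace_single (v : Char) (new l : List Char) :
    PySem.Chars.replace l [v] new = l.flatMap (fun c => if c = v then new else [c]) := by
  rw [PySem.Chars.replace]
  simp only [List.isEmpty_cons, Bool.false_eq_true, if_false]
  exact pv_go_single v new l.length l [] le_rfl

-- the vowel test of port A, characterised
lemma pv_isIn_vowels (c : Char) :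
    PySem.Str.isIn (String.ofList [c]) "aeiou"
      = decide (c = 'a' ∨ c = 'e' ∨ c = 'i' ∨ c = 'o' ∨ c = 'u') := by
  by_cases h : c = 'a' ∨ c = 'e' ∨ c = 'i' ∨ c = 'o' ∨ c = 'u'
  · rcases h with h | h | h | h | h <;> subst h <;> decide
  · simp only [h, decide_false]
    rw [← Bool.not_eq_true, PySem.Str.isIn_iff_infix]
    intro hinf
    rw [String.toList_ofList] at hinf
    have hmem : c ∈ "aeiou".toList := hinf.sublist.subset (List.mem_singleton_self c)
    rw [show "aeiou".toList = ['a', 'e', 'i', 'o', 'u'] from rfl] at hmem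
    simp only [List.mem_cons, List.not_mem_nil, or_false] at hmem
    exact h hmem

-- A's fold produces acc followed by the flatMap of pvExpand
lemma pv_A_foldl (l : List Char) :
    ∀ acc : String,
      (l.foldl
        (fun Risultato Car =>
          if PySem.Str.isIn (String.ofList [Car]) "aeiou" then
            Risultato ++ (String.ofList [Car] ++ "f" ++ String.ofList [Car])
          else
            Risultato ++ String.ofList [Car]) acc).toList
        = acc.toList ++ l.flatMap pvExpand := by
  induction l with
  | nil => intro acc; simp
  | cons c t ih =>
    intro acc
    simp only [List.foldl_cons, List.flatMap_cons]
    rw [pv_isIn_vowels]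
    by_cases h : c = 'a' ∨ c = 'e' ∨ c = 'i' ∨ c = 'o' ∨ c = 'u'
    · simp only [h, decide_true, if_true, ih]
      simp [pvExpand, h]
    · simp only [h, decide_false, Bool.false_eq_true, if_false, ih]
      simp [pvExpand, h]

-- the composition of the five per-vowel replacements equals pvExpand, per character
lemma pv_chain (c : Char) :
    ((((pvRep 'a' c).flatMap (pvRep 'e')).flatMap (pvRep 'i')).flatMap (pvRep 'o')).flatMap (pvRep 'u')
      = pvExpand c := by
  by_cases h : c = 'a' ∨ c = 'e' ∨ c = 'i' ∨ c = 'o' ∨ c = 'u'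
  · rcases h with h | h | h | h | h <;> subst h <;> decide
  · push Not at h
    obtain ⟨h1, h2, h3, h4, h5⟩ := h
    simp [pvRep, pvExpand, h1, h2, h3, h4, h5]

-- B's result as a flatMap of pvExpand
lemma pv_B_toList (Frase : String) :
    (Farfallizza_alt Frase).toList = Frase.toList.flatMap pvExpand := by
  unfold Farfallizza_alt
  rw [show "aeiou".toList = ['a', 'e', 'i', 'o', 'u'] from rfl]
  simp only [List.foldl_cons, List.foldl_nil, PySem.Str.toList_replace,
    String.toList_ofList, String.toList_append, show "f".toList = ['f'] from rfl]
  rw [pv_replace_single, pv_replace_single, pv_replace_single, pv_replace_single,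
    pv_replace_single]
  rw [List.flatMap_assoc, List.flatMap_assoc, List.flatMap_assoc, List.flatMap_assoc]
  congr 1
  funext c
  simpa [pvRep, List.flatMap_assoc] using pv_chain c

-- ===== VERDICT (by name: the statement is the Claim_ definition above) =====
theorem Farfallizza_spec : Claim_equal_Farfallizza := by
  intro Frase _
  unfold Spec_Farfallizza
  rw [← String.toList_inj]
  rw [pv_B_toList]
  have := pv_A_foldl Frase.toList ""
  simpa [Farfallizza] using this
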